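-- pv_equiv track=rewrite | github.com/revhea2/jeronism | index.py | _tag_vp
-- ===== SOURCE A (Python) =====
-- def _tag_vp(np):
--     vp = []
--     i = 0
--     while i < len(np):
--         tagged, phrase = np[i]
--         if i < len(np) - 1:
--             if "VB" in tagged and np[i + 1][0] == "np":
--                 vp.append(["vp", phrase + " " + np[i + 1][1]])
--                 i += 2
--                 continue
--         if "VB" in tagged:
--             tagged = "vp"
--         vp.append([tagged, phrase])
--         i += 1
--     return vp
-- ===== SOURCE B (Python) =====
-- def _tag_vp(np):
--     out = []
--     pending = None  # phrase of a not-yet-emitted verb item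
--     for tagged, phrase in np:
--         if pending is not None:
--             if tagged == "np":
--                 out.append(["vp", pending + " " + phrase])
--                 pending = None
--                 continue
--             out.append(["vp", pending])
--             pending = None
--         if "VB" in tagged:
--             pending = phrase
--         else:
--             out.append([tagged, phrase])
--     if pending is not None:
--         out.append(["vp", pending])
--     return out
-- ===== Notes on version B (the rewrite author's own statement) =====
-- stated objective: alternative
-- what changed: Replaced A's index-based while loop with i+=2 look-ahead at np[i+1] by a single forward pass that carries a 'pending' verb phrase and flushes it when the next item is not an 'np' phrase (and once after the loop).
import Mathlib
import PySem

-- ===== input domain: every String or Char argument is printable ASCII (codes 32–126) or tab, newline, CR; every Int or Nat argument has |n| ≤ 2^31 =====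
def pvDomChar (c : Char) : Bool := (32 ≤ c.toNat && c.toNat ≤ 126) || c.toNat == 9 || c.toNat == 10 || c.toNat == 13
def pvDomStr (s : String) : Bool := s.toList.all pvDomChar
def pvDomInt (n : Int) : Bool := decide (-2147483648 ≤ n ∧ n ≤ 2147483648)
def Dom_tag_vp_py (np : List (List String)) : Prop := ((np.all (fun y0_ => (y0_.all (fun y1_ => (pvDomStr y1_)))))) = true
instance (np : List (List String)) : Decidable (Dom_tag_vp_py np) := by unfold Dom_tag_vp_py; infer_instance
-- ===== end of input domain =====

-- B replaces A's index look-ahead (np[i+1], i += 2) with a single forward pass keeping a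
-- 'pending' verb phrase; same return value, same O(n) cost (objective: alternative decomposition).

-- ===== PORT A =====
-- while loop over index i rendered as structural recursion on the suffix np[i:];
-- 'i < len(np) - 1' is the two-element pattern, 'i += 2' drops both head elements.
-- Tuple unpacking 'tagged, phrase = np[i]' is exact under Pre_ (every item has length 2).
def tag_vp_py (np : List (List String)) : List (List String) :=
  match np with
  | [] => []
  | x :: rest =>
    let tagged := x.getD 0 ""
    let phrase := x.getD 1 ""
    match rest with
    | y :: rest' =>
      if PySem.Str.isIn "VB" tagged && (y.getD 0 "" == "np") then
        ["vp", phrase ++ " " ++ y.getD 1 ""] :: tag_vp_py rest'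
      else
        (if PySem.Str.isIn "VB" tagged then "vp" else tagged) :: [phrase]
          |> (· :: tag_vp_py (y :: rest'))
    | [] =>
      [(if PySem.Str.isIn "VB" tagged then "vp" else tagged), phrase] :: []

-- ===== PORT B =====
-- single pass with a pending verb phrase (Option String), tail flush after the loop
def tag_vp_alt_loop (pending : Option String) (np : List (List String)) : List (List String) :=
  match np with
  | [] =>
    match pending with
    | some p => [["vp", p]]
    | none => []
  | x :: rest =>
    let tagged := x.getD 0 ""
    let phrase := x.getD 1 ""
    match pending with
    | some p =>
      if tagged == "np" then
        ["vp", p ++ " " ++ phrase] :: tag_vp_alt_loop none rest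
      else
        ["vp", p] ::
          (if PySem.Str.isIn "VB" tagged then tag_vp_alt_loop (some phrase) rest
           else [tagged, phrase] :: tag_vp_alt_loop none rest)
    | none =>
      if PySem.Str.isIn "VB" tagged then tag_vp_alt_loop (some phrase) rest
      else [tagged, phrase] :: tag_vp_alt_loop none rest

def tag_vp_py_alt (np : List (List String)) : List (List String) :=
  tag_vp_alt_loop none np

-- ===== PRECONDITION & SPEC =====
-- Pre_: every item unpacks as 'tagged, phrase = np[i]', i.e. has exactly two components;
-- otherwise Python A raises ValueError (and B's loop unpacking raises too).
def Pre_tag_vp_py (np : List (List String)) : Prop := ∀ x ∈ np, x.length = 2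
instance (np : List (List String)) : Decidable (Pre_tag_vp_py np) := by unfold Pre_tag_vp_py; infer_instance
def pvWitness_tag_vp_py : List (List String) :=
  [["np", "the dog"], ["VBD", "ran"], ["np", "home"], ["nn", "x"]]

def Spec_tag_vp_py (np : List (List String)) (out : List (List String)) : Prop := out = tag_vp_py_alt np
instance (np : List (List String)) (out : List (List String)) : Decidable (Spec_tag_vp_py np out) := by unfold Spec_tag_vp_py; infer_instance

-- ===== CLAIM (what is proved, stated in full; the proofs are below) =====
def Claim_equal_tag_vp_py : Prop := ∀ (np : List (List String)), Dom_tag_vp_py np → Pre_tag_vp_py np → Spec_tag_vp_py np (tag_vp_py np)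

-- ===== LEMMAS AND PROOFS =====

-- What A does starting at a verb item whose phrase is p, with the rest of the list l:
-- exactly B's behaviour with 'pending = some p'.
def vbStep (p : String) (l : List (List String)) : List (List String) :=
  match l with
  | [] => [["vp", p]]
  | y :: rest' =>
    if y.getD 0 "" == "np" then
      ["vp", p ++ " " ++ y.getD 1 ""] :: tag_vp_py rest'
    else
      ["vp", p] :: tag_vp_py (y :: rest')

theorem tagA_vb (x : List String) (rest : List (List String))
    (h : PySem.Str.isIn "VB" (x.getD 0 "") = true) :
    tag_vp_py (x :: rest) = vbStep (x.getD 1 "") rest := by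
  simp at h
  cases rest with
  | nil => simp [tag_vp_py, vbStep, h]
  | cons y rest' =>
    by_cases hy : (y.getD 0 "" == "np") = true
    · simp at hy
      simp [tag_vp_py, vbStep, h, hy]
    · simp at hy
      simp [tag_vp_py, vbStep, h, hy]

theorem tagA_nvb (x : List String) (rest : List (List String))
    (h : PySem.Str.isIn "VB" (x.getD 0 "") = false) :
    tag_vp_py (x :: rest) = [x.getD 0 "", x.getD 1 ""] :: tag_vp_py rest := by
  simp at h
  cases rest with
  | nil => simp [tag_vp_py, h]
  | cons y rest' => simp [tag_vp_py, h]

theorem loopB_eq (l : List (List String)) :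
    (∀ p, tag_vp_alt_loop (some p) l = vbStep p l) ∧ tag_vp_alt_loop none l = tag_vp_py l := by
  induction l with
  | nil => constructor <;> simp [tag_vp_alt_loop, vbStep, tag_vp_py]
  | cons x rest ih =>
    have hnone : tag_vp_alt_loop none (x :: rest) = tag_vp_py (x :: rest) := by
      by_cases hvb : PySem.Str.isIn "VB" (x.getD 0 "") = true
      · rw [tagA_vb x rest hvb]
        simp at hvb
        simp [tag_vp_alt_loop, hvb, ih.1]
      · simp at hvb
        rw [tagA_nvb x rest (by simp [hvb])]
        simp [tag_vp_alt_loop, hvb, ih.2]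
    refine ⟨fun p => ?_, hnone⟩
    by_cases hnp : (x.getD 0 "" == "np") = true
    · simp at hnp
      have hvb : PySem.Chars.isIn ['V', 'B'] (x[0]?.getD "").toList = false := by
        rw [hnp]; decide
      simp [tag_vp_alt_loop, hnp, vbStep, ih.2]
    · simp only [tag_vp_alt_loop, hnp]
      rw [show vbStep p (x :: rest) = ["vp", p] :: tag_vp_py (x :: rest) by
        simp at hnp; simp [vbStep, hnp]]
      by_cases hvb : PySem.Str.isIn "VB" (x.getD 0 "") = true
      · rw [tagA_vb x rest hvb]
        simp at hvb
        simp [hvb, ih.1]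
      · simp at hvb
        rw [tagA_nvb x rest (by simp [hvb])]
        simp [hvb, ih.2]

-- ===== VERDICT (by name: the statement is the Claim_ definition above) =====
theorem tag_vp_py_spec : Claim_equal_tag_vp_py := by
  intro np _ _
  unfold Spec_tag_vp_py tag_vp_py_alt
  exact ((loopB_eq np).2).symm
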